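-- pv_equiv track=rewrite | github.com/915-Nistor-Anca/Faculty | First Year/First Semester/Fundamentals Of Programming/A3/program.py | get_command_and_args
-- ===== SOURCE A (Python) =====
-- def remove_useless_spaces(command_line):
--     """
--     This function removes the useless spaces between words.
--     :param command_line: a string
--     :return: the same given string, but without the unnecessary spaces
--     """
--     new_command_line = ' '
--     for i in range(0, len(command_line)):
--         if (command_line[i] >='a' and command_line[i] <='z') or (command_line[i] >='A' and command_line[i] <='Z') or (command_line[i] == '<' or command_line[i] == '>' or command_line[i] == '=') or (command_line[i] >='0' and command_line[i] <='9') or (command_line[i] == ' ' and new_command_line[-1]!=' '):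
--             new_command_line = new_command_line + command_line[i]
--     if new_command_line[0] == ' ':
--         new_command_line = new_command_line.removeprefix(' ')
--     if new_command_line[-1] == ' ':
--         new_command_line = new_command_line.removesuffix(' ')
--     return new_command_line
--
-- def get_command_and_args(command_line):
--     """
--     This function gives the command and the arguments from a command line.
--     It uses another defined function to remove the unnecessary spaces, in order to create the arguments list properly.
--     :param command_line: a string
--     :return: the command and the arguments
--     """
--     command_line = remove_useless_spaces(command_line)
--     position = command_line.find(' ')
--     if position == -1:
--         return command_line, []
--     command = command_line[:position]
--     args = command_line[position+1:]
--     args = args.split(' ')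
--     for word in args:
--         word=word.replace(' ', '')
--     return command, args
-- ===== SOURCE B (Python) =====
-- def _allowed(c):
--     return 'a' <= c <= 'z' or 'A' <= c <= 'Z' or '0' <= c <= '9' or c in ('<', '>', '=', ' ')
--
-- def get_command_and_args(command_line):
--     """Filter the allowed characters, split on spaces, drop the empty pieces;
--     the first word is the command, the rest are the arguments."""
--     words = [w for w in ''.join(filter(_allowed, command_line)).split(' ') if w]
--     return words[0], words[1:]
-- ===== Notes on version B (the rewrite author's own statement) =====
-- stated objective: simpler
-- what changed: B filters the allowed characters in one pass and splits on spaces dropping empty pieces, replacing A's index loop with a last-character state for collapsing spaces, the conditional prefix/suffix strips, the find of the first space and the slice-then-split.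
import Mathlib
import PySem

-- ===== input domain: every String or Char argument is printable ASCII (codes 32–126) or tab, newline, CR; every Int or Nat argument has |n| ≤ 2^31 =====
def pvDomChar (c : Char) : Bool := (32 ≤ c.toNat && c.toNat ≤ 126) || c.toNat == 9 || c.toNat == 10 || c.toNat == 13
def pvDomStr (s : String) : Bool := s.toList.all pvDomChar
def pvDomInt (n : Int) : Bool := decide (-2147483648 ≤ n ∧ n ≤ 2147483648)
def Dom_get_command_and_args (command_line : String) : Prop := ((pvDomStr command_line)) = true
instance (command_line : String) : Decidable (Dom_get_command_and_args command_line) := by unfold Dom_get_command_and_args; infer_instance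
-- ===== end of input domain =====

-- B filters the allowed characters once and splits on spaces dropping empty pieces,
-- instead of A's index loop that collapses spaces with a last-character check, strips,
-- finds the first space and slices (alternative decomposition, same cost).


-- ===== PORT A =====
-- A's character test, the disjuncts in A's order
def pvAllowedChar (c : Char) : Bool :=
  (decide ('a' ≤ c) && decide (c ≤ 'z')) || (decide ('A' ≤ c) && decide (c ≤ 'Z')) ||
  (c == '<' || c == '>' || c == '=') || (decide ('0' ≤ c) && decide (c ≤ '9'))

-- remove_useless_spaces on the char list; new_command_line[-1] / [0] via pyGetD
def pvRemoveUselessSpaces (cs : List Char) : List Char :=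
  let n := (PySem.List.pyRange 0 (PySem.Chars.len cs) 1).foldl
    (fun acc i =>
      let c := PySem.List.pyGetD cs i ' '
      if pvAllowedChar c || (c == ' ' && !(PySem.List.pyGetD acc (-1) ' ' == ' ')) then
        acc ++ [c]
      else acc)
    [' ']
  -- if new_command_line[0] == ' ': removeprefix(' ')  (under the guard this is drop 1)
  let n1 := if PySem.List.pyGetD n 0 ' ' == ' ' then n.drop 1 else n
  -- if new_command_line[-1] == ' ': removesuffix(' ')  (under the guard this is dropLast);
  -- n1 = [] raises IndexError in Python (outside Pre_), the default 'x' keeps the port total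
  if PySem.List.pyGetD n1 (-1) 'x' == ' ' then n1.dropLast else n1

def get_command_and_args (command_line : String) : String × List String :=
  let cl := pvRemoveUselessSpaces command_line.toList
  let position := PySem.Chars.find cl [' ']
  if position == -1 then (String.ofList cl, [])
  else
    let command := PySem.List.slice cl none (some position)
    let args0 := PySem.List.slice cl (some (position + 1)) none
    let args := PySem.Chars.splitOn args0 [' ']
    -- 'for word in args: word = word.replace(' ', '')' rebinds a local: no effect
    let _ := args.map (fun word => PySem.Chars.replace word [' '] [])
    (String.ofList command, args.map String.ofList)

-- ===== PORT B =====
-- B's character test (_allowed in Source B), the tests in Source B's order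
def pvAllowedCharAlt (c : Char) : Bool :=
  (decide ('a' ≤ c) && decide (c ≤ 'z')) || (decide ('A' ≤ c) && decide (c ≤ 'Z')) ||
  (decide ('0' ≤ c) && decide (c ≤ '9')) || (c == '<' || c == '>' || c == '=' || c == ' ')

def get_command_and_args_alt (command_line : String) : String × List String :=
  let cleaned := command_line.toList.filter pvAllowedCharAlt
  let words := (PySem.Chars.splitOn cleaned [' ']).filter (fun w => !w.isEmpty)
  match words with
  | w :: ws => (String.ofList w, ws.map String.ofList)
  | [] => ("", [])   -- words[0] raises IndexError in Python here (outside Pre_)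

-- ===== PRECONDITION & SPEC =====
-- Pre_ excludes exactly the inputs with no allowed non-space character: there A's
-- new_command_line[-1] raises IndexError (and B's words[0] raises IndexError too).
def Pre_get_command_and_args (command_line : String) : Prop :=
  command_line.toList.any pvAllowedChar = true
instance (command_line : String) : Decidable (Pre_get_command_and_args command_line) := by
  unfold Pre_get_command_and_args; infer_instance
def pvWitness_get_command_and_args : String := "add 1 2"

def Spec_get_command_and_args (command_line : String) (out : String × List String) : Prop := out = get_command_and_args_alt command_line
instance (command_line : String) (out : String × List String) : Decidable (Spec_get_command_and_args command_line out) := by unfold Spec_get_command_and_args; infer_instance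

-- ===== CLAIM (what is proved, stated in full; the proofs are below) =====
def Claim_equal_get_command_and_args : Prop := ∀ (command_line : String), Dom_get_command_and_args command_line → Pre_get_command_and_args command_line → Spec_get_command_and_args command_line (get_command_and_args command_line)

-- ===== LEMMAS AND PROOFS =====

-- reference split-on-space (what Python's str.split(' ') computes), structural
def pvSplit : List Char → List (List Char)
  | [] => [[]]
  | c :: t => if c = ' ' then [] :: pvSplit t else (pvSplit t).modifyHead (c :: ·)

-- join a word list with single spaces
def pvIc : List (List Char) → List Char
  | [] => []
  | [w] => w
  | w :: l => w ++ ' ' :: pvIc l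

-- the words of a string: nonempty pieces of the split
def pvW (xs : List Char) : List (List Char) := (pvSplit xs).filter (fun w => !w.isEmpty)

-- A's loop as a state machine keyed by whether the last kept char is a space
def pvG : Bool → List Char → List Char
  | _, [] => []
  | b, c :: t =>
    if pvAllowedChar c then c :: pvG false t
    else if c = ' ' ∧ b = false then ' ' :: pvG true t
    else pvG b t

-- A's final conditional strip of the trailing space
def pvStrip (l : List Char) : List Char :=
  if PySem.List.pyGetD l (-1) 'x' == ' ' then l.dropLast else l

lemma pvSplit_ne_nil (xs : List Char) : pvSplit xs ≠ [] := by
  cases xs with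
  | nil => simp [pvSplit]
  | cons c t =>
    simp only [pvSplit]
    split <;> simp [List.modifyHead_eq_nil_iff, pvSplit_ne_nil t]


lemma go_spec (fuel : Nat) (l cur : List Char) (acc : List (List Char)) (h : l.length < fuel) :
    PySem.Chars.splitOn.go [' '] fuel l cur acc
      = acc.reverse ++ (pvSplit l).modifyHead (cur.reverse ++ ·) := by
  induction fuel generalizing l cur acc with
  | zero => omega
  | succ f ih =>
    cases l with
    | nil => simp [PySem.Chars.splitOn.go, pvSplit]
    | cons c rest =>
      simp only [PySem.Chars.splitOn.go]
      by_cases hc : c = ' '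
      · subst hc
        rw [if_pos (by simp [List.isPrefixOf])]
        rw [ih _ _ _ (by simp at h ⊢; omega)]
        simp [pvSplit]
        cases pvSplit rest <;> simp [List.modifyHead]
      · rw [if_neg (by simp [List.isPrefixOf]; exact fun hh => hc hh.symm)]
        rw [ih _ _ _ (by simp at h ⊢; omega)]
        simp only [pvSplit, if_neg hc]
        rcases hS : pvSplit rest with _ | ⟨p, ps⟩
        · exact absurd hS (pvSplit_ne_nil rest)
        · simp


lemma splitOn_eq (xs : List Char) : PySem.Chars.splitOn xs [' '] = pvSplit xs := by
  rw [PySem.Chars.splitOn, go_spec _ _ _ _ (by omega)]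
  rcases hS : pvSplit xs with _ | ⟨p, ps⟩
  · exact absurd hS (pvSplit_ne_nil xs)
  · simp


lemma pvSplit_no_space (xs : List Char) : ∀ p ∈ pvSplit xs, ' ' ∉ p := by
  induction xs with
  | nil => simp [pvSplit]
  | cons c t ih =>
    simp only [pvSplit]
    by_cases hc : c = ' '
    · simp [hc]; exact ih
    · rw [if_neg hc]
      rcases hS : pvSplit t with _ | ⟨p, ps⟩
      · exact absurd hS (pvSplit_ne_nil t)
      · intro q hq
        rw [hS] at ih
        simp only [List.modifyHead] at hq
        rcases List.mem_cons.mp hq with hq | hq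
        · subst hq
          simp only [List.mem_cons, not_or]
          exact ⟨fun hh => hc hh.symm, ih p (by simp)⟩
        · exact ih q (by simp [hq])


lemma pvSplit_word (w xs : List Char) (hw : ∀ c ∈ w, c ≠ ' ') :
    pvSplit (w ++ xs) = (pvSplit xs).modifyHead (w ++ ·) := by
  induction w with
  | nil => simp only [List.nil_append]; cases pvSplit xs <;> simp [List.modifyHead]
  | cons c t ih =>
    simp only [List.cons_append, pvSplit, if_neg (hw c (by simp))]
    rw [ih (fun c hc => hw c (by simp [hc]))]
    rcases hS : pvSplit xs with _ | ⟨p, ps⟩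
    · exact absurd hS (pvSplit_ne_nil xs)
    · simp


lemma pvSplit_ic (ws : List (List Char)) (h : ws ≠ []) (hs : ∀ w ∈ ws, ' ' ∉ w) :
    pvSplit (pvIc ws) = ws := by
  induction ws with
  | nil => simp at h
  | cons w l ih =>
    have hw : ∀ c ∈ w, c ≠ ' ' := fun c hc he => hs w (by simp) (he ▸ hc)
    cases l with
    | nil =>
      have := pvSplit_word w [] hw
      simpa [pvIc, pvSplit, List.modifyHead] using this
    | cons v l' =>
      show pvSplit (w ++ ' ' :: pvIc (v :: l')) = _
      rw [pvSplit_word w _ hw]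
      simp only [pvSplit, reduceIte]
      rw [ih (by simp) (fun u hu => hs u (by simp [hu]))]
      simp [List.modifyHead]


lemma allowedAlt_eq (c : Char) : pvAllowedCharAlt c = (pvAllowedChar c || c == ' ') := by
  apply Bool.eq_iff_iff.mpr
  simp [pvAllowedChar, pvAllowedCharAlt]
  tauto

lemma allowed_space : pvAllowedChar ' ' = false := by decide


lemma pvG_filter (b : Bool) (cs : List Char) :
    pvG b cs = pvG b (cs.filter pvAllowedCharAlt) := by
  induction cs generalizing b with
  | nil => simp
  | cons c t ih =>
    by_cases ha : pvAllowedCharAlt c = true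
    · rw [List.filter_cons_of_pos ha]
      simp only [pvG]
      rw [allowedAlt_eq] at ha
      rcases Bool.or_eq_true_iff.mp ha with h | h
      · simp only [if_pos h]
        rw [ih]
      · have hsp : c = ' ' := by simpa using h
        subst hsp
        rw [if_neg (show ¬ (pvAllowedChar ' ' = true) by simp [allowed_space]),
            if_neg (show ¬ (pvAllowedChar ' ' = true) by simp [allowed_space])]
        by_cases hb : b = false
        · rw [if_pos ⟨rfl, hb⟩, if_pos ⟨rfl, hb⟩, ih]
        · rw [if_neg (by tauto), if_neg (by tauto), ih]
    · rw [List.filter_cons_of_neg ha]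
      rw [allowedAlt_eq] at ha
      simp only [Bool.or_eq_true, not_or] at ha
      simp only [pvG]
      rw [if_neg (by simp [ha.1]), if_neg (by simp; intro hc; exact absurd (by simp [hc]) ha.2)]
      exact ih b


lemma loop_eq (cs : List Char) (acc : List Char) (hacc : acc ≠ []) :
    cs.foldl (fun acc c =>
      if pvAllowedChar c || (c == ' ' && !(PySem.List.pyGetD acc (-1) ' ' == ' ')) then
        acc ++ [c]
      else acc) acc
      = acc ++ pvG (PySem.List.pyGetD acc (-1) ' ' == ' ') cs := by
  induction cs generalizing acc with
  | nil => simp [pvG]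
  | cons c t ih =>
    simp only [List.foldl_cons, pvG]
    by_cases h1 : pvAllowedChar c = true
    · have hno : (c == ' ') = false := by
        cases hcc : (c == ' ') with
        | false => rfl
        | true =>
          rw [(beq_iff_eq).mp hcc] at h1
          exact absurd h1 (by simp [allowed_space])
      rw [if_pos (by simp [h1]), if_pos h1, ih _ (by simp)]
      rw [PySem.List.pyGetD_neg_one_append_singleton, hno]
      simp
    · by_cases h2 : c = ' ' ∧ (PySem.List.pyGetD acc (-1) ' ' == ' ') = false
      · obtain ⟨hc, hflag⟩ := h2
        subst hc
        rw [if_pos (by simp [hflag]), ih _ (by simp)]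
        rw [PySem.List.pyGetD_neg_one_append_singleton]
        rw [if_neg h1, if_pos ⟨rfl, hflag⟩]
        simp
      · rw [Bool.not_eq_true] at h1
        have hcond : (pvAllowedChar c || (c == ' ' && !(PySem.List.pyGetD acc (-1) ' ' == ' '))) = false := by
          by_cases hc : c = ' '
          · rcases Bool.eq_false_or_eq_true (PySem.List.pyGetD acc (-1) ' ' == ' ') with hf | hf
            · simp [h1, hf]
            · exact absurd ⟨hc, hf⟩ h2
          · simp [h1, hc]
        rw [if_neg (by simp [hcond]), ih _ hacc]
        rw [if_neg (by simp [h1]), if_neg h2]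


lemma pvG_word (w rest : List Char) (b : Bool) (hw : w ≠ []) (h : ∀ c ∈ w, pvAllowedChar c = true) :
    pvG b (w ++ rest) = w ++ pvG false rest := by
  induction w generalizing b with
  | nil => exact absurd rfl hw
  | cons c t ih =>
    simp only [List.cons_append, pvG, if_pos (h c (by simp))]
    cases t with
    | nil => simp
    | cons d t' =>
      rw [ih false (by simp) (fun x hx => h x (by simp [hx]))]


lemma pvStrip_no_space (l : List Char) (h : ' ' ∉ l) : pvStrip l = l := by
  cases l with
  | nil => simp [pvStrip, PySem.List.pyGetD]
  | cons c t =>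
    rw [pvStrip, if_neg]
    simp only [beq_iff_eq]
    rw [PySem.List.pyGetD_neg_one (c :: t) 'x' (by simp)]
    intro hh
    exact h (hh ▸ List.getLast_mem _)


lemma pvStrip_append (u v : List Char) (hv : v ≠ []) : pvStrip (u ++ v) = u ++ pvStrip v := by
  have huv : u ++ v ≠ [] := by simp [hv]
  rw [pvStrip, pvStrip, PySem.List.pyGetD_neg_one (u ++ v) 'x' huv,
    PySem.List.pyGetD_neg_one v 'x' hv]
  rw [show (u ++ v).getLast huv = v.getLast hv from List.getLast_append_of_ne_nil huv hv]
  split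
  · rw [List.dropLast_append_of_ne_nil hv]
  · rfl


lemma pvStrip_concat_space (w : List Char) : pvStrip (w ++ [' ']) = w := by
  rw [pvStrip, if_pos (by rw [PySem.List.pyGetD_neg_one_append_singleton w ' ' 'x']; decide)]
  exact List.dropLast_concat ..


lemma pvG_main (n : Nat) (xs : List Char) (hn : xs.length ≤ n)
    (h : ∀ c ∈ xs, c ≠ ' ' → pvAllowedChar c = true) :
    pvStrip (pvG true xs) = pvIc (pvW xs) ∧ (pvG true xs = [] ↔ pvW xs = []) := by
  induction n generalizing xs with
  | zero =>
    have : xs = [] := by cases xs <;> simp_all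
    subst this
    simp [pvG, pvSplit, pvW, pvIc, pvStrip, PySem.List.pyGetD]
  | succ n ih =>
    cases hxs : xs with
    | nil => simp [pvG, pvSplit, pvW, pvIc, pvStrip, PySem.List.pyGetD]
    | cons c t =>
      subst hxs
      by_cases hc : c = ' '
      · subst hc
        have e1 : pvG true (' ' :: t) = pvG true t := by
          simp [pvG, allowed_space]
        have e2 : pvW (' ' :: t) = pvW t := by
          simp [pvW, pvSplit]
        rw [e1, e2]
        exact ih t (by simp at hn; omega) (fun x hx => h x (by simp [hx]))
      · -- leading word
        set w : List Char := c :: t.takeWhile (· ≠ ' ') with hw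
        set rest : List Char := t.dropWhile (· ≠ ' ') with hrest
        have hxw : c :: t = w ++ rest := by
          simp [hw, hrest, List.takeWhile_append_dropWhile]
        have hwns : ∀ x ∈ w, x ≠ ' ' := by
          intro x hx
          rw [hw] at hx
          rcases List.mem_cons.mp hx with hx | hx
          · exact hx ▸ hc
          · simpa using List.mem_takeWhile_imp hx
        have hwal : ∀ x ∈ w, pvAllowedChar x = true := by
          intro x hx
          exact h x (hxw ▸ List.mem_append_left _ hx) (hwns x hx)
        have hwne : w ≠ [] := by simp [hw]
        have hgw : pvG true (c :: t) = w ++ pvG false rest := by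
          rw [hxw]; exact pvG_word _ _ _ hwne hwal
        have hsw : pvSplit (c :: t) = (pvSplit rest).modifyHead (w ++ ·) := by
          rw [hxw]; exact pvSplit_word _ _ hwns
        cases hr : rest with
        | nil =>
          rw [hgw, hr]
          have : pvSplit (c :: t) = [w] := by
            rw [hsw, hr]; simp [pvSplit, List.modifyHead]
          rw [pvW, this]
          simp only [List.filter, hwne]
          constructor
          · rw [show pvG false [] = [] from rfl, List.append_nil]
            rw [pvStrip_no_space w (fun hsp => hwns ' ' hsp rfl)]
            simp [pvIc, List.filter, List.isEmpty_eq_false_iff.mpr hwne]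
          · simp [hwne, List.isEmpty_eq_false_iff.mpr hwne]
        | cons r rs =>
          have hrsp : r = ' ' := by
            have := List.head?_dropWhile_not (· ≠ ' ') t
            rw [← hrest, hr] at this
            simpa using this
          subst hrsp
          have hglen : rs.length ≤ n := by
            have : (c :: t).length = w.length + rest.length := by rw [hxw]; simp
            simp [hr] at this
            simp at hn
            omega
          have hrs : ∀ x ∈ rs, x ≠ ' ' → pvAllowedChar x = true := by
            intro x hx
            exact h x (hxw ▸ List.mem_append_right _ (by simp [hr, hx]))
          obtain ⟨ih1, ih2⟩ := ih rs hglen hrs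
          have hgr : pvG true (c :: t) = w ++ ' ' :: pvG true rs := by
            rw [hgw, hr]
            simp [pvG, allowed_space]
          have hWr : pvW (c :: t) = w :: pvW rs := by
            rw [pvW, hsw, hr]
            simp only [pvSplit, reduceIte]
            simp [List.modifyHead, pvW, List.filter, List.isEmpty_eq_false_iff.mpr hwne]
          rw [hgr, hWr]
          refine ⟨?_, by simp [hwne]⟩
          by_cases hge : pvG true rs = []
          · have hWe : pvW rs = [] := ih2.mp hge
            rw [hge, hWe]
            simpa [pvIc] using pvStrip_concat_space w
          · have hWe : pvW rs ≠ [] := fun hh => hge (ih2.mpr hh)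
            have : w ++ ' ' :: pvG true rs = (w ++ [' ']) ++ pvG true rs := by simp
            rw [this, pvStrip_append _ _ hge, ih1]
            rcases hWl : pvW rs with _ | ⟨v, l'⟩
            · exact absurd hWl hWe
            · simp [pvIc]


lemma remove_eq (cs : List Char) :
    pvRemoveUselessSpaces cs = pvIc (pvW (cs.filter pvAllowedCharAlt)) := by
  rw [pvRemoveUselessSpaces]
  simp only [PySem.Chars.len_eq]
  rw [PySem.List.foldl_pyRange_zero_pyGetD' cs ' '
    (fun acc c => if pvAllowedChar c || (c == ' ' && !(PySem.List.pyGetD acc (-1) ' ' == ' ')) then acc ++ [c] else acc)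
    [' ']]
  rw [loop_eq cs [' '] (by simp)]
  have h1 : PySem.List.pyGetD ([' '] : List Char) (-1) ' ' = ' ' := by decide
  rw [h1]
  simp only [List.singleton_append, PySem.List.pyGetD_zero_cons, BEq.rfl, reduceIte, List.drop_one,
    List.tail_cons]
  rw [show (if (PySem.List.pyGetD (pvG true cs) (-1) 'x' == ' ') = true then (pvG true cs).dropLast
      else pvG true cs) = pvStrip (pvG true cs) from rfl]
  rw [pvG_filter]
  exact (pvG_main (cs.filter pvAllowedCharAlt).length _ le_rfl
    (fun x hx hsp => by
      have := List.of_mem_filter hx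
      rw [allowedAlt_eq] at this
      rcases Bool.or_eq_true_iff.mp this with h | h
      · exact h
      · exact absurd (by simpa using h) hsp)).1


lemma find_no_space (w : List Char) (hw : ' ' ∉ w) : PySem.Chars.find w [' '] = -1 := by
  rw [PySem.Chars.find_eq_neg_one_iff]
  intro hinf
  obtain ⟨s, t, hst⟩ := hinf
  exact hw (by rw [← hst]; simp)


lemma find_word (w r : List Char) (hw : ' ' ∉ w) :
    PySem.Chars.find (w ++ ' ' :: r) [' '] = (w.length : Int) := by
  have hinf : ([' '] : List Char) <:+: (w ++ ' ' :: r) := ⟨w, r, by simp⟩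
  have h0 : 0 ≤ PySem.Chars.find (w ++ ' ' :: r) [' '] :=
    (PySem.Chars.find_nonneg_iff _ _).mpr hinf
  obtain ⟨hpre, hmin⟩ := PySem.Chars.find_spec h0
  set j := (PySem.Chars.find (w ++ ' ' :: r) [' ']).toNat with hj
  have hle : ¬ w.length < j := fun hlt => hmin w.length hlt ⟨r, by simp⟩
  have hge : ¬ j < w.length := by
    intro hlt
    obtain ⟨t, ht⟩ := hpre
    have hhead : (List.drop j (w ++ ' ' :: r)).head? = some ' ' := by rw [← ht]; simp
    rw [List.head?_drop, List.getElem?_append_left hlt] at hhead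
    exact hw (List.mem_of_getElem? hhead)
  have hjl : j = w.length := by omega
  rw [← Int.toNat_of_nonneg h0, ← hj, hjl]

-- ===== VERDICT (by name: the statement is the Claim_ definition above) =====
theorem get_command_and_args_spec : Claim_equal_get_command_and_args := by
  unfold Claim_equal_get_command_and_args
  intro s _ _
  unfold Spec_get_command_and_args
  simp only [get_command_and_args, get_command_and_args_alt]
  simp only [splitOn_eq]
  rw [remove_eq]
  rw [show (pvSplit (s.toList.filter pvAllowedCharAlt)).filter (fun w => !w.isEmpty)
      = pvW (s.toList.filter pvAllowedCharAlt) from rfl]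
  have hsp : ∀ p ∈ pvW (s.toList.filter pvAllowedCharAlt), ' ' ∉ p := fun p hp =>
    pvSplit_no_space _ p (List.mem_of_mem_filter hp)
  rcases hW : pvW (s.toList.filter pvAllowedCharAlt) with _ | ⟨w, l⟩
  · rw [show pvIc [] = ([] : List Char) from rfl]
    rw [find_no_space [] (by simp)]
    simp
  · rw [hW] at hsp
    have hwsp : ' ' ∉ w := hsp w (by simp)
    cases l with
    | nil =>
      rw [show pvIc [w] = w from rfl, find_no_space w hwsp]
      simp
    | cons v l' =>
      rw [show pvIc (w :: v :: l') = w ++ ' ' :: pvIc (v :: l') from rfl]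
      rw [find_word w _ hwsp]
      rw [show ((w.length : Int) == -1) = false by simp]
      simp only [Bool.false_eq_true, if_false]
      rw [PySem.List.slice_to_natCast]
      rw [show ((w.length : Int) + 1) = ((w.length + 1 : Nat) : Int) by push_cast; ring]
      rw [PySem.List.slice_from_natCast]
      rw [List.take_left]
      rw [show (w ++ ' ' :: pvIc (v :: l')) = (w ++ [' ']) ++ pvIc (v :: l') by simp]
      rw [show w.length + 1 = (w ++ [' ']).length by simp]
      rw [List.drop_left]
      rw [pvSplit_ic (v :: l') (by simp) (fun u hu => hsp u (by simp [hu]))]
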